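-- pv_equiv track=rewrite | github.com/KeshavSingh2703/AI_interviewer | ai_interviewer_projects/ai-interviewer-voice/resume_parser.py | suggest_role
-- ===== SOURCE A (Python) =====
-- from typing import Dict, List, Any
--
-- def suggest_role(skills: Dict[str, List[str]], experience: Dict[str, Any]) -> str:
--     """Suggest the most suitable role based on skills and experience."""
--     role_scores = {}
--
--     for role, found_skills in skills.items():
--         score = len(found_skills)
--         # Bonus for experience
--         if experience['years_experience'] > 0:
--             score += min(experience['years_experience'], 5)
--         role_scores[role] = score
--
--     if not role_scores:
--         return 'sde'  # Default role
--
--     return max(role_scores, key=role_scores.get)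
-- ===== SOURCE B (Python) =====
-- from typing import Dict, List, Any
--
-- def suggest_role(skills: Dict[str, List[str]], experience: Dict[str, Any]) -> str:
--     """Suggest the most suitable role based on skills and experience."""
--     best_role = None
--     best_score = None
--     for role, found_skills in skills.items():
--         score = len(found_skills)
--         # Bonus for experience
--         if experience['years_experience'] > 0:
--             score += min(experience['years_experience'], 5)
--         if best_role is None or score > best_score:
--             best_role = role
--             best_score = score
--     if best_role is None:
--         return 'sde'  # Default role
--     return best_role
-- ===== Notes on version B (the rewrite author's own statement) =====
-- stated objective: simpler
-- what changed: Replaces the build-a-role-to-score-dict-then-max(key=dict.get) two-pass structure with a single streaming argmax loop that keeps best_role/best_score and updates only on a strictly greater score (preserving first-occurrence tie-breaking); no intermediate dict is built.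
import Mathlib
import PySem

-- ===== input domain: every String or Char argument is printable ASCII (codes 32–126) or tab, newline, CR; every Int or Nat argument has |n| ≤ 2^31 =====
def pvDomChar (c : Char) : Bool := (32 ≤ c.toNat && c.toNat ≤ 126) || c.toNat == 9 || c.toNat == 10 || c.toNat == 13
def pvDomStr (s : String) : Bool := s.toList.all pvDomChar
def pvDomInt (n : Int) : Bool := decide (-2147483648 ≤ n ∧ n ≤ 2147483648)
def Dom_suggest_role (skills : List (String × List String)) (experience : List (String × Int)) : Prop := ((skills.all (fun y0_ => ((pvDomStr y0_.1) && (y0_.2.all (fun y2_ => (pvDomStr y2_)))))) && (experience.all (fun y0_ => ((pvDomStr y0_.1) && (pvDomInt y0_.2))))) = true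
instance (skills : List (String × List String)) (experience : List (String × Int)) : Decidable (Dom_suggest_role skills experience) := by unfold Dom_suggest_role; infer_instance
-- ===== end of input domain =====

-- B replaces A's build-role→score-dict-then-max(key=get) with a single streaming argmax loop (simpler, no intermediate dict); return values proved equal.


-- the per-role score both Pythons compute identically inside their loop:
-- score = len(found_skills); if experience['years_experience'] > 0: score += min(experience['years_experience'], 5)
-- (experience['years_experience'] ported as getD … 0; the KeyError case is outside Pre_)
def pyRoleScore (experience : List (String × Int)) (found_skills : List String) : Int :=
  let score : Int := found_skills.length
  let yrs : Int := (PySem.Dict.mk experience).getD "years_experience" 0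
  if yrs > 0 then score + min yrs 5 else score

-- ===== PORT A =====
def suggest_role (skills : List (String × List String)) (experience : List (String × Int)) : String :=
  let role_scores : PySem.Dict String Int :=
    skills.foldl (fun d p => d.insert p.1 (pyRoleScore experience p.2)) PySem.Dict.empty
  if role_scores.items = [] then "sde"
  else
    -- max(role_scores, key=role_scores.get): first key of maximal value (every key is in the dict, so get = getD … 0)
    (PySem.List.max? role_scores.keys (fun r => role_scores.getD r 0)).getD "sde"

-- ===== PORT B =====
def suggest_role_alt (skills : List (String × List String)) (experience : List (String × Int)) : String :=
  let best : Option (String × Int) :=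
    skills.foldl (fun best p =>
      let score : Int := pyRoleScore experience p.2
      match best with
      | none => some (p.1, score)
      | some (br, bs) => if bs < score then some (p.1, score) else some (br, bs)) none
  match best with
  | none => "sde"
  | some (r, _) => r

-- ===== PRECONDITION & SPEC =====
-- Pre_ excludes (a) skills lists whose keys repeat — such a list does not arise from any Python dict, so A is
-- never called on it — and (b) nonempty skills with no 'years_experience' key in experience, where A raises KeyError.
def Pre_suggest_role (skills : List (String × List String)) (experience : List (String × Int)) : Prop :=
  (skills.map Prod.fst).Nodup ∧
  (skills = [] ∨ ((PySem.Dict.mk experience).get? "years_experience").isSome = true)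
instance (skills : List (String × List String)) (experience : List (String × Int)) : Decidable (Pre_suggest_role skills experience) := by unfold Pre_suggest_role; infer_instance
def pvWitness_suggest_role : (List (String × List String)) × (List (String × Int)) :=
  ([("sde", ["python", "sql"]), ("ml", ["pytorch"])], [("years_experience", 3)])

def Spec_suggest_role (skills : List (String × List String)) (experience : List (String × Int)) (out : String) : Prop := out = suggest_role_alt skills experience
instance (skills : List (String × List String)) (experience : List (String × Int)) (out : String) : Decidable (Spec_suggest_role skills experience out) := by unfold Spec_suggest_role; infer_instance

-- ===== CLAIM (what is proved, stated in full; the proofs are below) =====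
def Claim_equal_suggest_role : Prop := ∀ (skills : List (String × List String)) (experience : List (String × Int)), Dom_suggest_role skills experience → Pre_suggest_role skills experience → Spec_suggest_role skills experience (suggest_role skills experience)

-- ===== LEMMAS AND PROOFS =====

-- A's max?-over-keys fold and B's streaming-argmax fold keep accumulators related by Prod.fst,
-- provided every visited pair (and any pair in the accumulator) is an item of the dict with unique keys.
lemma fold_rel (d : PySem.Dict String Int) (hn : d.keys.Nodup)
    (gA : Option String → (String × Int) → Option String)
    (hgA : ∀ acc p, gA acc p = match acc with
        | none => some p.1
        | some m => if d.getD m 0 < d.getD p.1 0 then some p.1 else some m)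
    (gB : Option (String × Int) → (String × Int) → Option (String × Int))
    (hgB : ∀ acc p, gB acc p = match acc with
        | none => some p
        | some (br, bs) => if bs < p.2 then some p else some (br, bs)) :
    ∀ (t : List (String × Int)), (∀ p ∈ t, p ∈ d.items) →
    ∀ (b : Option (String × Int)) (bs : Option String), bs = Option.map Prod.fst b →
      (∀ m, b = some m → m ∈ d.items) →
      t.foldl gA bs = Option.map Prod.fst (t.foldl gB b) := by
  intro t
  induction t with
  | nil => intro _ b bs hbs _; simpa using hbs
  | cons p t ih =>
    intro hmem b bs hbs hb
    subst hbs
    have hp : p ∈ d.items := hmem p (by simp)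
    have hkp : d.getD p.1 0 = p.2 := PySem.Dict.getD_of_mem_items d hp hn 0
    rw [List.foldl_cons, List.foldl_cons, hgA, hgB]
    cases b with
    | none =>
      exact ih (fun q hq => hmem q (by simp [hq])) (some p) _ rfl
        (by intro m hm'; exact Option.some.inj hm' ▸ hp)
    | some m =>
      have hm : m ∈ d.items := hb m rfl
      have hkm : d.getD m.1 0 = m.2 := PySem.Dict.getD_of_mem_items d hm hn 0
      simp only [Option.map_some]
      rcases m with ⟨br, bq⟩
      simp only [hkm, hkp]
      by_cases h : bq < p.2
      · simp only [if_pos h]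
        exact ih (fun q hq => hmem q (by simp [hq])) (some p) _ rfl
          (by intro m hm'; exact Option.some.inj hm' ▸ hp)
      · simp only [if_neg h]
        exact ih (fun q hq => hmem q (by simp [hq])) (some (br, bq)) _ rfl
          (by intro m hm'; exact Option.some.inj hm' ▸ hm)

-- unpack the Prod.fst-mapped accumulator into B's final match
lemma getD_map_fst (o : Option (String × Int)) :
    (Option.map Prod.fst o).getD "sde" = (match o with | none => "sde" | some (r, _) => r) := by
  cases o <;> rfl

-- ===== VERDICT (by name: the statement is the Claim_ definition above) =====
theorem suggest_role_spec : Claim_equal_suggest_role := by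
  intro skills experience _ hpre
  obtain ⟨hnd, -⟩ := hpre
  unfold Spec_suggest_role suggest_role suggest_role_alt
  set f : String × List String → Int := fun p => pyRoleScore experience p.2 with hf
  have hitems :
      (skills.foldl (fun d p => d.insert p.1 (pyRoleScore experience p.2)) PySem.Dict.empty).items
        = skills.map (fun p => (p.1, f p)) := by
    have := PySem.Dict.items_foldl_insert_fresh skills (fun p => p.1) (fun p => f p)
      PySem.Dict.empty (by intro a _; simp [PySem.Dict.contains_empty]) hnd
    simpa using this
  set D : PySem.Dict String Int :=
    skills.foldl (fun d p => d.insert p.1 (pyRoleScore experience p.2)) PySem.Dict.empty with hD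
  have hkeys : D.keys = (skills.map (fun p => (p.1, f p))).map Prod.fst := by
    simp only [PySem.Dict.keys, hitems]
  have hn : D.keys.Nodup := by
    rw [hkeys]
    simpa [List.map_map, Function.comp] using hnd
  cases skills with
  | nil =>
    simp [hD, PySem.Dict.empty]
  | cons s0 t =>
    rw [if_neg (by rw [hitems]; simp)]
    unfold PySem.List.max?
    rw [hkeys, List.foldl_map]
    refine Eq.trans (congrArg (fun o => Option.getD o "sde")
      (fold_rel D hn _ (by intro acc p; cases acc <;> rfl)
        (fun acc p => match acc with
          | none => some p
          | some (br, bs) => if bs < p.2 then some p else some (br, bs))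
        (fun acc p => rfl)
        (List.map (fun p => (p.1, f p)) (s0 :: t))
        (by intro p hp; rw [hitems]; exact hp)
        none none rfl (by intro m hm'; cases hm'))) ?_
    rw [List.foldl_map]
    beta_reduce
    rw [getD_map_fst]
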